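-- pv_equiv track=rewrite | github.com/Ericka-7james/earlybloom | backend/app/services/jobs/parsing.py | _best_scored_level
-- ===== SOURCE A (Python) =====
-- _EXPERIENCE_LEVEL_ORDER = {
--     "unknown": 0,
--     "entry-level": 1,
--     "junior": 2,
--     "mid-level": 3,
--     "senior": 4,
-- }
--
-- def _best_scored_level(scores: dict[str, int]) -> str:
--     """Return the highest-confidence experience level from weighted scores."""
--     best_level = "unknown"
--     best_score = 0
--
--     for level, score in scores.items():
--         if score > best_score:
--             best_level = level
--             best_score = score
--         elif score == best_score and score > 0:
--             if _EXPERIENCE_LEVEL_ORDER[level] > _EXPERIENCE_LEVEL_ORDER[best_level]: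
--                 best_level = level
--
--     return best_level if best_score > 0 else "unknown"
-- ===== SOURCE B (Python) =====
-- _EXPERIENCE_LEVEL_ORDER = {
--     "unknown": 0,
--     "entry-level": 1,
--     "junior": 2,
--     "mid-level": 3,
--     "senior": 4,
-- }
--
-- def _best_scored_level(scores: dict[str, int]) -> str:
--     """Return the highest-confidence experience level from weighted scores."""
--     best = max(scores.values(), default=0)
--     if best <= 0:
--         return "unknown"
--     winners = [level for level, score in scores.items() if score == best]
--     if len(winners) == 1:
--         return winners[0]
--     return max(winners, key=_EXPERIENCE_LEVEL_ORDER.__getitem__)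
-- ===== Notes on version B (the rewrite author's own statement) =====
-- stated objective: simpler
-- what changed: A's single accumulating scan (tracking best level and score with an in-loop ordinal tie-break) is replaced by a find-max pass over the values, then a winners list filtered at that max, returning a unique winner directly and resolving genuine ties by one max-by-ordinal selection.
import Mathlib
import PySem

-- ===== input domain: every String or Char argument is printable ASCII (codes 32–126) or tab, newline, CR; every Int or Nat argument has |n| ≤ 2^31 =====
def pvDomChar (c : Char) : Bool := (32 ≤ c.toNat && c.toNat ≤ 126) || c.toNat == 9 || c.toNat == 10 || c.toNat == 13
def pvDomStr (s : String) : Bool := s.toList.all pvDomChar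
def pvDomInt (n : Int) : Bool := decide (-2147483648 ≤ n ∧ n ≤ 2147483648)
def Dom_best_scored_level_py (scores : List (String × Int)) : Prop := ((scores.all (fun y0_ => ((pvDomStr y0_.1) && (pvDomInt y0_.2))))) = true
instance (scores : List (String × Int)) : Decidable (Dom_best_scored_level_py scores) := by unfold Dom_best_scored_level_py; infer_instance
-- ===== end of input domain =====

-- A's single accumulating scan is reshaped into a find-max pass plus a winners/tie-resolution pass (objective: simpler).


-- ===== PORT A =====
-- _EXPERIENCE_LEVEL_ORDER
def pvOrder : PySem.Dict String Int :=
  PySem.Dict.ofList [("unknown", 0), ("entry-level", 1), ("junior", 2), ("mid-level", 3), ("senior", 4)]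

def best_scored_level_py (scores : List (String × Int)) : String :=
  -- best_level = "unknown"; best_score = 0; for level, score in scores.items(): ...
  let st := scores.foldl
    (fun (st : String × Int) (p : String × Int) =>
      if p.2 > st.2 then (p.1, p.2)
      else if p.2 = st.2 ∧ p.2 > 0 then
        -- _EXPERIENCE_LEVEL_ORDER[level] raises KeyError on an absent key; Pre_ guarantees both
        -- keys are present here, so getD is exact on every admitted input
        (if pvOrder.getD p.1 0 > pvOrder.getD st.1 0 then p.1 else st.1, st.2)
      else st)
    ("unknown", 0)
  if st.2 > 0 then st.1 else "unknown"

-- ===== PORT B =====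
def best_scored_level_py_alt (scores : List (String × Int)) : String :=
  -- best = max(scores.values(), default=0)
  let best := (PySem.List.max? (scores.map (fun p => p.2)) (fun v => v)).getD 0
  if best ≤ 0 then "unknown"
  else
    -- winners = [level for level, score in scores.items() if score == best]
    let winners := (scores.filter (fun p => p.2 == best)).map (fun p => p.1)
    match winners with
    | [w] => w  -- if len(winners) == 1: return winners[0]
    | _ =>
      -- max(winners, key=_EXPERIENCE_LEVEL_ORDER.__getitem__); __getitem__ raises KeyError on an
      -- absent key, which Pre_ excludes, so getD is exact; winners = [] is unreachable (best > 0),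
      -- where Python max would raise ValueError, and the .getD default is never used
      (PySem.List.max? winners (fun l => pvOrder.getD l 0)).getD "unknown"

-- ===== PRECONDITION & SPEC =====
-- Pre_ excludes exactly the inputs on which A raises KeyError: some entry j ties (equal positive
-- score, maximal among entries up to j) with an earlier entry i while either key is outside
-- _EXPERIENCE_LEVEL_ORDER — the tie-break branch then looks an absent key up.
def Pre_best_scored_level_py (scores : List (String × Int)) : Prop :=
  ∀ j < scores.length, ∀ i < j,
    ((scores.getD i ("", 0)).2 = (scores.getD j ("", 0)).2 ∧ (scores.getD j ("", 0)).2 > 0 ∧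
      ∀ k < j, (scores.getD k ("", 0)).2 ≤ (scores.getD j ("", 0)).2) →
    pvOrder.contains (scores.getD i ("", 0)).1 ∧ pvOrder.contains (scores.getD j ("", 0)).1
instance (scores : List (String × Int)) : Decidable (Pre_best_scored_level_py scores) := by
  unfold Pre_best_scored_level_py; infer_instance

def pvWitness_best_scored_level_py : (List (String × Int)) :=
  [("senior", 2), ("junior", 2), ("x", 1)]

def Spec_best_scored_level_py (scores : List (String × Int)) (out : String) : Prop := out = best_scored_level_py_alt scores
instance (scores : List (String × Int)) (out : String) : Decidable (Spec_best_scored_level_py scores out) := by unfold Spec_best_scored_level_py; infer_instance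

-- ===== CLAIM (what is proved, stated in full; the proofs are below) =====
def Claim_equal_best_scored_level_py : Prop := ∀ (scores : List (String × Int)), Dom_best_scored_level_py scores → Pre_best_scored_level_py scores → Spec_best_scored_level_py scores (best_scored_level_py scores)

-- ===== LEMMAS AND PROOFS =====
set_option maxRecDepth 8000

-- A's loop body, named for the proofs (definitionally the lambda in the port)
def pvStep (st : String × Int) (p : String × Int) : String × Int :=
  if p.2 > st.2 then (p.1, p.2)
  else if p.2 = st.2 ∧ p.2 > 0 then
    (if pvOrder.getD p.1 0 > pvOrder.getD st.1 0 then p.1 else st.1, st.2)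
  else st

def pvOrd (s : String) : Int := pvOrder.getD s 0

-- first maximum by pvOrd, starting from accumulator c (= Python max with key, first extremal)
def pvMF (c : String) (cs : List String) : String :=
  cs.foldl (fun a x => if pvOrd a < pvOrd x then x else a) c

def pvBest (bs : Int) (l : List (String × Int)) : Int :=
  l.foldl (fun m p => max m p.2) bs

def pvWs (best : Int) (l : List (String × Int)) : List String :=
  (l.filter (fun p => p.2 == best)).map (fun p => p.1)

-- generalized two-pass result, seen from A's running state (bl, bs)
def pvBgen (bl : String) (bs : Int) (l : List (String × Int)) : String :=
  let best := pvBest bs l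
  if best ≤ 0 then "unknown"
  else if bs = best then pvMF bl (pvWs best l)
  else
    match pvWs best l with
    | [] => "unknown"
    | c :: cs => pvMF c cs

lemma pvBest_seed_le (l : List (String × Int)) (bs : Int) : bs ≤ pvBest bs l :=
  (PySem.List.le_foldl_max_int l (fun p => p.2) bs).1

lemma pvBest_max (l : List (String × Int)) (a b : Int) :
    pvBest (max a b) l = max a (pvBest b l) := by
  induction l generalizing b with
  | nil => rfl
  | cons y t ih =>
      show pvBest (max (max a b) y.2) t = max a (pvBest (max b y.2) t)
      rw [max_assoc, ih]

lemma pvWs_cons (best : Int) (x : String × Int) (l : List (String × Int)) :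
    pvWs best (x :: l) = if x.2 = best then x.1 :: pvWs best l else pvWs best l := by
  simp only [pvWs, List.filter_cons]
  by_cases h : x.2 = best
  · simp [h]
  · simp [h]

lemma pvMax?_cons (key : String → Int) : ∀ (cs : List String) (c : String),
    PySem.List.max? (c :: cs) key
      = some (cs.foldl (fun a x => if key a < key x then x else a) c) := by
  intro cs
  induction cs with
  | nil => intro c; rfl
  | cons y t ih =>
      intro c
      have h1 : PySem.List.max? (c :: y :: t) key
          = PySem.List.max? ((if key c < key y then y else c) :: t) key := by
        by_cases h : key c < key y
        · simp [PySem.List.max?, h]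
        · simp [PySem.List.max?, h]
      rw [h1, ih, List.foldl_cons]

-- one step of A's loop commutes with the generalized two-pass result
lemma pvStep_pvBgen (x : String × Int) (l : List (String × Int)) (bl : String) (bs : Int) :
    pvBgen (pvStep (bl, bs) x).1 (pvStep (bl, bs) x).2 l = pvBgen bl bs (x :: l) := by
  have hbest : pvBest bs (x :: l) = pvBest (max bs x.2) l := rfl
  by_cases h1 : x.2 > bs
  · -- score > best_score: state becomes (x.1, x.2)
    have hst : pvStep (bl, bs) x = (x.1, x.2) := by
      simp only [pvStep]; rw [if_pos h1]
    rw [hst]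
    have hM : pvBest bs (x :: l) = pvBest x.2 l := by
      rw [hbest, max_eq_right (le_of_lt h1)]
    have hle : x.2 ≤ pvBest x.2 l := pvBest_seed_le l x.2
    have hne : ¬ bs = pvBest x.2 l := by omega
    simp only [pvBgen, hM, pvWs_cons]
    by_cases hle0 : pvBest x.2 l ≤ 0
    · simp only [if_pos hle0]
    · simp only [if_neg hle0, if_neg hne]
      by_cases heq : x.2 = pvBest x.2 l
      · simp only [if_pos heq]
      · simp only [if_neg heq]
  · by_cases h2 : x.2 = bs ∧ x.2 > 0
    · -- tie at the current positive best: ordinal comparison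
      have hst : pvStep (bl, bs) x
          = (if pvOrder.getD x.1 0 > pvOrder.getD bl 0 then x.1 else bl, bs) := by
        simp only [pvStep]; rw [if_neg h1, if_pos h2]
      rw [hst]
      have hM : pvBest bs (x :: l) = pvBest bs l := by
        rw [hbest, h2.1, max_self]
      have hpos : (0:Int) < bs := by omega
      have hle0 : ¬ pvBest bs l ≤ 0 := by
        have := pvBest_seed_le l bs; omega
      by_cases heq : bs = pvBest bs l
      · have hx : x.2 = pvBest bs l := h2.1.trans heq
        simp only [pvBgen, hM, pvWs_cons, if_neg hle0, if_pos heq, if_pos hx]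
        simp only [pvMF, List.foldl_cons]
        rfl
      · have hx : ¬ x.2 = pvBest bs l := by rw [h2.1]; exact heq
        simp only [pvBgen, hM, pvWs_cons, if_neg hle0, if_neg heq, if_neg hx]
    · -- ignored element: state unchanged
      have hst : pvStep (bl, bs) x = (bl, bs) := by
        simp only [pvStep]; rw [if_neg h1, if_neg h2]
      rw [hst]
      have hx2 : x.2 ≤ bs := by omega
      have hM : pvBest bs (x :: l) = pvBest bs l := by
        rw [hbest, max_eq_left hx2]
      by_cases heq : x.2 = pvBest bs l
      · -- only reachable with x.2 = bs = best ≤ 0: both sides are "unknown"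
        have hbsle : bs ≤ pvBest bs l := pvBest_seed_le l bs
        have hle0 : pvBest bs l ≤ 0 := by
          by_contra hpos
          exact h2 ⟨by omega, by omega⟩
        simp only [pvBgen, hM, if_pos hle0]
      · simp only [pvBgen, hM, pvWs_cons, if_neg heq]

-- A's whole loop plus its final guard equals the generalized two-pass result
lemma pvA_eq_pvBgen (l : List (String × Int)) (bl : String) (bs : Int) :
    (let st := List.foldl pvStep (bl, bs) l
     if st.2 > 0 then st.1 else "unknown") = pvBgen bl bs l := by
  induction l generalizing bl bs with
  | nil =>
      simp only [List.foldl_nil, pvBgen, pvBest, pvWs, pvMF, List.foldl_nil]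
      by_cases h : bs ≤ 0
      · have hng : ¬ bs > 0 := by omega
        simp [h, hng]
      · have hgt : bs > 0 := by omega
        simp [h, hgt]
  | cons x t ih =>
      rw [List.foldl_cons]
      rcases hst : pvStep (bl, bs) x with ⟨bl2, bs2⟩
      have hih := ih bl2 bs2
      simp only [hih]
      have h2 := pvStep_pvBgen x t bl bs
      rw [hst] at h2
      exact h2

-- B equals the generalized two-pass result at the initial state
lemma pvAlt_eq (scores : List (String × Int)) :
    best_scored_level_py_alt scores = pvBgen "unknown" 0 scores := by
  cases scores with
  | nil => rfl
  | cons x l =>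
      have hb : (PySem.List.max? ((x :: l).map (fun p => p.2)) (fun v => v)).getD 0
          = pvBest x.2 l := by
        show (PySem.List.max? (x.2 :: l.map (fun p => p.2)) (fun v => v)).getD 0 = _
        rw [PySem.List.max?_id_cons]
        simp [pvBest, List.foldl_map]
      have hM : pvBest 0 (x :: l) = max 0 (pvBest x.2 l) := by
        show pvBest (max 0 x.2) l = _
        rw [pvBest_max]
      simp only [best_scored_level_py_alt, hb]
      by_cases hle : pvBest x.2 l ≤ 0
      · have h0 : max 0 (pvBest x.2 l) ≤ 0 := by omega
        simp only [if_pos hle, pvBgen, hM, if_pos h0]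
      · have hpos : ¬ max 0 (pvBest x.2 l) ≤ 0 := by omega
        have hMe : max 0 (pvBest x.2 l) = pvBest x.2 l := by omega
        have hne : ¬ (0:Int) = pvBest x.2 l := by omega
        simp only [if_neg hle, pvBgen, hM, hMe, if_neg hne]
        have hws : pvWs (pvBest x.2 l) (x :: l)
            = ((x :: l).filter (fun p => p.2 == pvBest x.2 l)).map (fun p => p.1) := rfl
        rw [← hws]
        rcases hw : pvWs (pvBest x.2 l) (x :: l) with _ | ⟨c, cs⟩
        · rfl
        · cases cs with
          | nil => rfl
          | cons c2 cs2 =>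
              rw [pvMax?_cons]
              rfl

-- ===== VERDICT (by name: the statement is the Claim_ definition above) =====
theorem best_scored_level_py_spec : Claim_equal_best_scored_level_py := by
  intro scores _hdom _hpre
  show best_scored_level_py scores = best_scored_level_py_alt scores
  rw [pvAlt_eq]
  exact pvA_eq_pvBgen scores "unknown" 0
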